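-- pv_equiv track=rewrite | github.com/EkoSoftware/Python-Projects | Python Chatrum med Inloggning/Backup/v.43/v0.9.1(Förbereda för Github) - Backup/kladdchiffer.py | myDecipher
-- ===== SOURCE A (Python) =====
-- def myDecipher(text, key):
--     decryption = ''
--     while len(key) < len(text):
--         key += key
--     key = key[:len(text)]
--
--     for i, char in enumerate(text):
--         value = ord(char) - ord(key[i])
--         decryption += chr(value)
--
--     return decryption
-- ===== SOURCE B (Python) =====
-- def myDecipher(text, key):
--     rev = list(reversed(key))
--     stack = []
--     out = []
--     for c in text:
--         if not stack:
--             stack = rev.copy()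
--         out.append(chr(ord(c) - ord(stack.pop())))
--     return ''.join(out)
-- ===== Notes on version B (the rewrite author's own statement) =====
-- stated objective: alternative
-- what changed: Replaces A's key-doubling precompute plus indexed scan with a single pass that uses the reversed key as a stack: one character is popped per text character and the stack is refilled from the reversed key whenever it empties, so no extended key and no index arithmetic exist at all.
import Mathlib
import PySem

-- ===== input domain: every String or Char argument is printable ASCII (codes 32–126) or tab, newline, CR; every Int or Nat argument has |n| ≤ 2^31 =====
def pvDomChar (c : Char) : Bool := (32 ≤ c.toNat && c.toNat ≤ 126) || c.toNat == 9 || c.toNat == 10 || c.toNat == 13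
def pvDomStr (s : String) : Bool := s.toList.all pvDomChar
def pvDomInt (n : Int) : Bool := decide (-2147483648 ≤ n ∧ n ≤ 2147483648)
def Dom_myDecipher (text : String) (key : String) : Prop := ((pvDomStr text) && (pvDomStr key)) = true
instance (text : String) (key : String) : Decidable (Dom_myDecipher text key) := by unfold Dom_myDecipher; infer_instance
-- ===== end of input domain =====

-- B drops A's key-doubling precompute and indexed scan: it treats the reversed key as a
-- stack, pops one character per text character and refills the stack when it empties
-- (objective: alternative — no extended key, no index arithmetic). Equivalence is claimed
-- on Pre_ (key nonempty unless text is empty, no chr of a negative value), where A returns.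

-- ===== PORT A =====
-- the 'while len(key) < len(text): key += key' loop; the 'key = []' guard only makes the
-- recursion total (Python loops forever there; such inputs are outside Pre_)
def pvGrowKey (tlen : Nat) (key : List Char) : List Char :=
  if key.length < tlen then
    if key = [] then key
    else pvGrowKey tlen (key ++ key)
  else key
termination_by tlen - key.length
decreasing_by
  rename_i h hk
  have : 1 ≤ key.length := List.length_pos_iff.mpr hk
  simp only [List.length_append]
  omega

-- chr(ord(char) - ord(key[i])): ord is Char.toNat (exact on ASCII); chr via Char.ofNat after
-- .toNat — exact whenever the value is nonnegative (Python raises ValueError on a negative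
-- value; those inputs are outside Pre_), and key[i]! is in range on Pre_.
def myDecipher (text : String) (key : String) : String :=
  let t := text.toList
  -- key = key[:len(text)]  (nonnegative bound, so the slice is 'take')
  let k := (pvGrowKey t.length key.toList).take t.length
  String.ofList ((PySem.List.enumerate t 0).foldl
    (fun acc p => acc ++ [Char.ofNat ((p.2.toNat : Int) - ((k[p.1.toNat]!).toNat : Int)).toNat]) [])

-- ===== PORT B =====
-- rev = list(reversed(key)); stack refilled from rev when empty; stack.pop() = getLast?/
-- dropLast (Python raises IndexError popping an empty stack — only when key = '', outside Pre_).
def myDecipher_alt (text : String) (key : String) : String :=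
  let rev := key.toList.reverse
  let st := text.toList.foldl
    (fun (s : List Char × List Char) c =>
      let stack := if s.1 = [] then rev else s.1
      match stack.getLast? with
      | some k => (stack.dropLast, s.2 ++ [Char.ofNat ((c.toNat : Int) - (k.toNat : Int)).toNat])
      | none => ([], s.2))
    ([], [])
  String.ofList st.2

-- ===== PRECONDITION & SPEC =====
-- Pre_ excludes the inputs on which Python A does not return: an empty key with nonempty text
-- (A's doubling loop runs forever) and any position where the text character's code is below
-- the corresponding repeated-key character's code (chr of a negative raises ValueError).
def Pre_myDecipher (text : String) (key : String) : Prop :=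
  (key = "" → text = "") ∧
  ∀ i < text.toList.length,
    (key.toList[i % key.toList.length]!).toNat ≤ (text.toList[i]!).toNat
instance (text : String) (key : String) : Decidable (Pre_myDecipher text key) := by
  unfold Pre_myDecipher; infer_instance

def pvWitness_myDecipher : String × String := ("khoor", "222")

def Spec_myDecipher (text : String) (key : String) (out : String) : Prop := out = myDecipher_alt text key
instance (text : String) (key : String) (out : String) : Decidable (Spec_myDecipher text key out) := by unfold Spec_myDecipher; infer_instance

-- ===== CLAIM =====
def Claim_equal_myDecipher : Prop := ∀ (text : String) (key : String), Dom_myDecipher text key → Pre_myDecipher text key → Spec_myDecipher text key (myDecipher text key)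

-- ===== LEMMAS AND PROOFS =====

-- the common reference: character j of the output is chr(text[j] - key[j mod |key|])
def pvBuild (key : List Char) : Nat → List Char → List Char
  | _, [] => []
  | i, c :: cs =>
      Char.ofNat ((c.toNat : Int) - ((key[i % key.length]!).toNat : Int)).toNat ::
        pvBuild key (i + 1) cs

-- invariant of the doubling loop: length is a multiple of |key| and entries repeat key
theorem pvGrowKey_spec (tlen : Nat) (key : List Char) (L : List Char) (hk : key ≠ [])
    (hL0 : L ≠ []) (hdvd : key.length ∣ L.length)
    (hper : ∀ i, i < L.length → L[i]! = key[i % key.length]!) :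
    (key.length ∣ (pvGrowKey tlen L).length ∧
      (∀ i, i < (pvGrowKey tlen L).length → (pvGrowKey tlen L)[i]! = key[i % key.length]!) ∧
      tlen ≤ (pvGrowKey tlen L).length) ∨ (pvGrowKey tlen L = L ∧ ¬ L.length < tlen) := by
  fun_induction pvGrowKey tlen L with
  | case1 h => exact absurd rfl hL0
  | case2 L h hL ih =>
    left
    have hdvd2 : key.length ∣ (L ++ L).length := by
      simp only [List.length_append]; exact Nat.dvd_add hdvd hdvd
    have hLpos : 0 < L.length := List.length_pos_iff.mpr hL
    have hper2 : ∀ i, i < (L ++ L).length → (L ++ L)[i]! = key[i % key.length]! := by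
      intro i hi
      simp only [List.length_append] at hi
      have hi3 : i < (L ++ L).length := by simp only [List.length_append]; omega
      rw [getElem!_pos (L ++ L) i hi3]
      by_cases hlt : i < L.length
      · rw [List.getElem_append_left hlt]
        have := hper i hlt
        rwa [getElem!_pos L i hlt] at this
      · have hi2 : i - L.length < L.length := by omega
        rw [List.getElem_append_right (by omega)]
        have := hper (i - L.length) hi2
        rw [getElem!_pos L (i - L.length) hi2] at this
        rw [this]
        obtain ⟨c, hc⟩ := hdvd
        congr 1
        have hkpos : 0 < key.length := List.length_pos_iff.mpr hk
        rcases c with _ | c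
        · omega
        · calc (i - L.length) % key.length
              = (i - L.length + key.length * (c+1)) % key.length := by
                rw [Nat.add_mul_mod_self_left]
            _ = i % key.length := by congr 1; omega
    rcases ih (by simp [hL]) hdvd2 hper2 with ⟨h1, h2, h3⟩ | ⟨hRL, hnl⟩
    · exact ⟨h1, h2, h3⟩
    · rw [hRL]
      refine ⟨hdvd2, hper2, ?_⟩
      simp only [List.length_append] at hnl ⊢; omega
  | case3 L h => right; exact ⟨rfl, h⟩

theorem pvGrowKey_get (tlen : Nat) (key : List Char) (hk : key ≠ []) :
    ∀ i, i < tlen →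
      ((pvGrowKey tlen key).take tlen)[i]! = key[i % key.length]! := by
  intro i hi
  have hkpos : 0 < key.length := List.length_pos_iff.mpr hk
  have hinit : ∀ j, j < key.length → key[j]! = key[j % key.length]! := by
    intro j hj; congr 1; exact (Nat.mod_eq_of_lt hj).symm
  have hiR : i < (pvGrowKey tlen key).length ∧
      (pvGrowKey tlen key)[i]! = key[i % key.length]! := by
    rcases pvGrowKey_spec tlen key key hk hk ⟨1, (Nat.mul_one _).symm⟩ hinit with
      ⟨_, hper, hlen⟩ | ⟨hRL, hnl⟩
    · exact ⟨by omega, hper i (by omega)⟩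
    · rw [hRL]
      have hi' : i < key.length := by omega
      exact ⟨hi', hinit i hi'⟩
  have h2 := hiR.2
  rw [getElem!_pos (pvGrowKey tlen key) i hiR.1] at h2
  have hitake : i < ((pvGrowKey tlen key).take tlen).length := by
    rw [List.length_take]; omega
  rw [getElem!_pos ((pvGrowKey tlen key).take tlen) i hitake, List.getElem_take]
  exact h2

-- A's enumerate-map form equals the reference
theorem pvMapEnum_build (key : List Char) : ∀ (t : List Char) (i : Nat),
    (PySem.List.enumerate t (i : Int)).map
      (fun p => Char.ofNat ((p.2.toNat : Int) - ((key[p.1.toNat % key.length]!).toNat : Int)).toNat)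
      = pvBuild key i t := by
  intro t
  induction t with
  | nil => intro i; simp [pvBuild, PySem.List.enumerate_nil]
  | cons c cs ih =>
    intro i
    rw [PySem.List.enumerate_cons]
    simp only [List.map_cons, pvBuild, Int.toNat_natCast, List.cons.injEq, true_and]
    rw [show ((i : Int) + 1) = (((i + 1 : Nat)) : Int) by push_cast; ring]
    exact ih (i + 1)

-- the successor step of cyclic popping, stated on the stack length
theorem pvModStep (n i : Nat) (hn : 0 < n) :
    (n - (i + 1) % n) % n = n - i % n - 1 := by
  rcases Nat.lt_or_ge n 2 with h2 | h2
  · interval_cases n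
    simp [Nat.mod_one]
  · have hone : 1 % n = 1 := Nat.mod_eq_of_lt (by omega)
    have hstep : (i + 1) % n = (i % n + 1) % n := by
      rw [Nat.add_mod, hone]
    have hm : i % n < n := Nat.mod_lt _ hn
    by_cases hlast : i % n + 1 = n
    · rw [hstep, hlast, Nat.mod_self, Nat.sub_zero, Nat.mod_self]
      omega
    · rw [hstep, Nat.mod_eq_of_lt (by omega : i % n + 1 < n),
        Nat.mod_eq_of_lt (by omega : n - (i % n + 1) < n)]
      omega

-- invariant of B's stack loop: at absolute position i the stack is the reversed key with
-- (i mod |key|) characters already popped, and the loop appends the reference characters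
theorem pvLoop_spec (key : List Char) (hk : key ≠ []) :
    ∀ (chars : List Char) (i : Nat) (acc : List Char),
      chars.foldl
        (fun (s : List Char × List Char) c =>
          let stack := if s.1 = [] then key.reverse else s.1
          match stack.getLast? with
          | some k => (stack.dropLast, s.2 ++ [Char.ofNat ((c.toNat : Int) - (k.toNat : Int)).toNat])
          | none => ([], s.2))
        (key.reverse.take ((key.length - i % key.length) % key.length), acc)
      = (key.reverse.take ((key.length - (i + chars.length) % key.length) % key.length),
         acc ++ pvBuild key i chars) := by
  have hn : 0 < key.length := List.length_pos_iff.mpr hk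
  intro chars
  induction chars with
  | nil => intro i acc; simp [pvBuild]
  | cons c cs ih =>
    intro i acc
    have hm : i % key.length < key.length := Nat.mod_lt _ hn
    -- the stack after the (possible) refill
    have hstack :
        (if key.reverse.take ((key.length - i % key.length) % key.length) = ([] : List Char)
          then key.reverse
          else key.reverse.take ((key.length - i % key.length) % key.length))
        = key.reverse.take (key.length - i % key.length) := by
      by_cases h0 : i % key.length = 0
      · rw [h0]
        simp [Nat.mod_self]
      · have hlt : key.length - i % key.length < key.length := by omega
        rw [Nat.mod_eq_of_lt hlt]
        rw [if_neg]
        intro hnil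
        have := congrArg List.length hnil
        simp only [List.length_take, List.length_reverse, List.length_nil] at this
        omega
    have hslen : (key.reverse.take (key.length - i % key.length)).length
        = key.length - i % key.length := by
      simp [List.length_take]
    have hlast : (key.reverse.take (key.length - i % key.length)).getLast?
        = some (key[i % key.length]!) := by
      rw [List.getLast?_eq_getElem?, hslen]
      rw [List.getElem?_eq_getElem (by rw [hslen]; omega)]
      congr 1
      rw [List.getElem_take, List.getElem_reverse]
      rw [getElem!_pos key (i % key.length) hm]
      congr 1
      omega
    have hdrop : (key.reverse.take (key.length - i % key.length)).dropLast
        = key.reverse.take ((key.length - (i + 1) % key.length) % key.length) := by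
      rw [List.dropLast_eq_take, hslen, List.take_take, pvModStep _ _ hn]
      congr 1
      omega
    have happ :
        (fun (s : List Char × List Char) c =>
          let stack := if s.1 = [] then key.reverse else s.1
          match stack.getLast? with
          | some k => (stack.dropLast, s.2 ++ [Char.ofNat ((c.toNat : Int) - (k.toNat : Int)).toNat])
          | none => ([], s.2))
          (key.reverse.take ((key.length - i % key.length) % key.length), acc) c
        = (key.reverse.take ((key.length - (i + 1) % key.length) % key.length),
            acc ++ [Char.ofNat ((c.toNat : Int) - ((key[i % key.length]!).toNat : Int)).toNat]) := by
      simp only []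
      rw [hstack, hlast, hdrop]
    rw [List.foldl_cons]
    refine Eq.trans (congrArg (fun st : List Char × List Char =>
      List.foldl
        (fun (s : List Char × List Char) c =>
          let stack := if s.1 = [] then key.reverse else s.1
          match stack.getLast? with
          | some k => (stack.dropLast, s.2 ++ [Char.ofNat ((c.toNat : Int) - (k.toNat : Int)).toNat])
          | none => ([], s.2))
        st cs) happ) ?_
    rw [ih (i + 1)]
    simp only [List.length_cons]
    rw [show i + (cs.length + 1) = i + 1 + cs.length from by omega]
    simp [pvBuild]

-- ===== VERDICT =====
theorem myDecipher_spec : Claim_equal_myDecipher := by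
  intro text key _ hpre
  show myDecipher text key = myDecipher_alt text key
  by_cases hk : key.toList = []
  · have hkey : key = "" := by
      rw [← String.ofList_toList (s := key), hk]
    have ht : text = "" := hpre.1 hkey
    rw [hkey, ht]
    decide
  · simp only [myDecipher, myDecipher_alt]
    rw [PySem.List.foldl_append_singleton_eq_map]
    have hA : (PySem.List.enumerate text.toList 0).map
        (fun p => Char.ofNat ((p.2.toNat : Int)
          - ((((pvGrowKey text.toList.length key.toList).take text.toList.length)[p.1.toNat]!).toNat : Int)).toNat)
        = pvBuild key.toList 0 text.toList := by
      rw [show (0 : Int) = ((0 : Nat) : Int) from rfl]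
      rw [← pvMapEnum_build key.toList text.toList 0]
      apply List.map_congr_left
      intro p hp
      rcases (PySem.List.mem_enumerate_iff _ _ _).mp hp with ⟨j, hj, rfl⟩
      have h1 : ((((0:Nat):Int) + (j:Int), text.toList[j]).1).toNat = j := by simp
      simp only [h1]
      rw [pvGrowKey_get text.toList.length key.toList hk j hj]
    have hB := pvLoop_spec key.toList hk text.toList 0 []
    rw [show key.toList.reverse.take
          ((key.toList.length - 0 % key.toList.length) % key.toList.length) = ([] : List Char)
        from by simp] at hB
    have hB2 := congrArg Prod.snd hB
    simp only [List.nil_append] at hB2 ⊢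
    rw [hA, ← hB2]
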